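-- pv_equiv track=rewrite | github.com/Rishik15/quickdraw | backend/app/preprocessing/sequence.py | convertStrokes
-- ===== SOURCE A (Python) =====
-- def convertStrokes(drawing):
--     sequence = []
--     prevx, prevy = 0, 0
--
--     for stroke in drawing:
--         xseq, yseq = stroke
--         for i in range(len(xseq)):
--             dx = xseq[i] - prevx
--             dy = yseq[i] - prevy
--             prevx, prevy = xseq[i], yseq[i]
--
--             if i < len(xseq) - 1:
--                 pen_state = [1, 0, 0]
--             else:
--                 pen_state = [0, 1, 0]
--
--             sequence.append([dx, dy] + pen_state)
--
--     sequence.append([0, 0, 0, 0, 1])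
--     return sequence
-- ===== SOURCE B (Python) =====
-- def convertStrokes(drawing):
--     points = []
--     flags = []
--     for xs, ys in drawing:
--         pts = [(xs[i], ys[i]) for i in range(len(xs))]
--         points.extend(pts)
--         flags.extend([False] * (len(pts) - 1) + [True] if pts else [])
--     shifted = [(0, 0)] + points
--     rows = [[x - px, y - py] + ([0, 1, 0] if last else [1, 0, 0])
--             for (px, py), (x, y), last in zip(shifted, points, flags)]
--     rows.append([0, 0, 0, 0, 1])
--     return rows
-- ===== Notes on version B (the rewrite author's own statement) =====
-- stated objective: alternative
-- what changed: Replaces the running prevx/prevy accumulator with a flatten-then-pairwise decomposition: all stroke points are flattened once with last-in-stroke flags, deltas are computed as pairwise differences of the origin-prepended point list via zip, and rows are assembled by a single zip/comprehension.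
import Mathlib
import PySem

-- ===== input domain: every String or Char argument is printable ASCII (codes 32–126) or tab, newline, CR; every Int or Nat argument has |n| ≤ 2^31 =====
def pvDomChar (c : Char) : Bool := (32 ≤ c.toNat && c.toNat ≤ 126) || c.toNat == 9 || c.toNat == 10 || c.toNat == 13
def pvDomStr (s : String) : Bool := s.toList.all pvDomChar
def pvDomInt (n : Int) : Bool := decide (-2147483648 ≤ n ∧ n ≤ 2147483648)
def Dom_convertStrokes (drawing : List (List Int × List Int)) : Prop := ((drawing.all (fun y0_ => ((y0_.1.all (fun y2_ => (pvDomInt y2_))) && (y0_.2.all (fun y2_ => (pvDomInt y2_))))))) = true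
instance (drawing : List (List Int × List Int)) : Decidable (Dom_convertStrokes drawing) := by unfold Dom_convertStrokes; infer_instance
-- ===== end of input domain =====

-- B replaces A's running prevx/prevy accumulator by flattening all points with
-- last-in-stroke flags and taking pairwise differences of the origin-prepended
-- point list (objective: alternative decomposition, same cost).

-- ===== PORT A =====
-- inner loop 'for i in range(len(xseq))'; the .getD 0 is exact on Pre_ (both
-- indexings are in range there; Python raises IndexError exactly outside Pre_).
def convertStrokesInner (xs ys : List Int) (i : Nat)
    (st : List (List Int) × Int × Int) : List (List Int) × Int × Int :=
  if i < xs.length then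
    let x := (PySem.List.pyGet? xs (i : Int)).getD 0
    let y := (PySem.List.pyGet? ys (i : Int)).getD 0
    let pen := if (i : Int) < (xs.length : Int) - 1 then ([1, 0, 0] : List Int) else [0, 1, 0]
    convertStrokesInner xs ys (i + 1) (st.1 ++ [[x - st.2.1, y - st.2.2] ++ pen], x, y)
  else st
termination_by xs.length - i

def convertStrokes (drawing : List (List Int × List Int)) : List (List Int) :=
  let st := drawing.foldl (fun st stroke => convertStrokesInner stroke.1 stroke.2 0 st)
    ([], 0, 0)
  st.1 ++ [[0, 0, 0, 0, 1]]

-- ===== PORT B =====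
-- '[(xs[i], ys[i]) for i in range(len(xs))]'; the .getD 0 is exact on Pre_
-- (both indexings are in range there; Python raises IndexError exactly outside Pre_).
def convertStrokes_alt (drawing : List (List Int × List Int)) : List (List Int) :=
  let pf := drawing.foldl
    (fun (acc : List (Int × Int) × List Bool) stroke =>
      let pts := (List.range stroke.1.length).map
        (fun (i : Nat) => ((PySem.List.pyGet? stroke.1 (i : Int)).getD 0,
                   (PySem.List.pyGet? stroke.2 (i : Int)).getD 0))
      (acc.1 ++ pts,
       acc.2 ++ (if pts.isEmpty then [] else List.replicate (pts.length - 1) false ++ [true])))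
    ([], [])
  let points := pf.1
  let flags := pf.2
  let shifted := (0, 0) :: points
  let rows := (shifted.zip (points.zip flags)).map
    (fun t => [t.2.1.1 - t.1.1, t.2.1.2 - t.1.2] ++
      (if t.2.2 then ([0, 1, 0] : List Int) else [1, 0, 0]))
  rows ++ [[0, 0, 0, 0, 1]]

-- ===== PRECONDITION & SPEC =====
-- Pre_ excludes exactly the inputs where A raises IndexError: a stroke whose
-- x-list is longer than its y-list (A indexes yseq by range(len(xseq))).
def Pre_convertStrokes (drawing : List (List Int × List Int)) : Prop :=
  ∀ s ∈ drawing, s.1.length ≤ s.2.length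
instance (drawing : List (List Int × List Int)) : Decidable (Pre_convertStrokes drawing) := by
  unfold Pre_convertStrokes; infer_instance

def pvWitness_convertStrokes : (List (List Int × List Int)) := [([1, 2], [3, 4])]

def Spec_convertStrokes (drawing : List (List Int × List Int)) (out : List (List Int)) : Prop := out = convertStrokes_alt drawing
instance (drawing : List (List Int × List Int)) (out : List (List Int)) : Decidable (Spec_convertStrokes drawing out) := by unfold Spec_convertStrokes; infer_instance

-- ===== CLAIM (what is proved, stated in full; the proofs are below) =====
def Claim_equal_convertStrokes : Prop := ∀ (drawing : List (List Int × List Int)), Dom_convertStrokes drawing → Pre_convertStrokes drawing → Spec_convertStrokes drawing (convertStrokes drawing)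

-- ===== LEMMAS AND PROOFS =====

-- reference decomposition both ports are reduced to
def strokeRows (p : Int × Int) : List (Int × Int) → List (List Int)
  | [] => []
  | (x, y) :: ps =>
      ([x - p.1, y - p.2] ++ (if ps = [] then ([0, 1, 0] : List Int) else [1, 0, 0]))
        :: strokeRows (x, y) ps

def lastPt (p : Int × Int) : List (Int × Int) → Int × Int
  | [] => p
  | q :: qs => lastPt q qs

def allRows (p : Int × Int) : List (List Int × List Int) → List (List Int)
  | [] => []
  | s :: ss => strokeRows p (s.1.zip s.2) ++ allRows (lastPt p (s.1.zip s.2)) ss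

theorem convertStrokesInner_eq (xs ys : List Int) (hlen : xs.length ≤ ys.length) :
    ∀ k i, xs.length - i ≤ k → i ≤ xs.length → ∀ (seq : List (List Int)) (p : Int × Int),
      convertStrokesInner xs ys i (seq, p) =
        (seq ++ strokeRows p ((xs.zip ys).drop i), lastPt p ((xs.zip ys).drop i)) := by
  intro k
  induction k with
  | zero =>
    intro i hk hi seq p
    have hieq : i = xs.length := by omega
    rw [convertStrokesInner]
    have hnil : (xs.zip ys).drop i = [] := by
      apply List.eq_nil_of_length_eq_zero
      simp [List.length_zip]; omega
    subst hieq
    simp [hnil, strokeRows, lastPt]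
  | succ k ih =>
    intro i hk hi seq p
    rw [convertStrokesInner]
    by_cases h : i < xs.length
    · have hy : i < ys.length := lt_of_lt_of_le h hlen
      have hz : i < (xs.zip ys).length := by simp [List.length_zip]; omega
      have hdrop : (xs.zip ys).drop i = (xs[i], ys[i]) :: (xs.zip ys).drop (i + 1) := by
        rw [List.drop_eq_getElem_cons hz]; simp
      have hx : (PySem.List.pyGet? xs (i : Int)).getD 0 = xs[i] := by
        simp [PySem.List.pyGet?_natCast, List.getElem?_eq_getElem h]
      have hyv : (PySem.List.pyGet? ys (i : Int)).getD 0 = ys[i] := by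
        simp [PySem.List.pyGet?_natCast, List.getElem?_eq_getElem hy]
      simp only [h, if_pos, hx, hyv]
      rw [ih (i + 1) (by omega) (by omega)]
      rw [hdrop]
      have hzz : (xs.zip ys).length = min xs.length ys.length := List.length_zip
      have hdropnil : ((xs.zip ys).drop (i + 1) = []) ↔ ¬ ((i : Int) < (xs.length : Int) - 1) := by
        constructor
        · intro hn
          have h2 := congrArg List.length hn
          simp at h2
          omega
        · intro hn
          apply List.eq_nil_of_length_eq_zero
          simp
          omega
      by_cases hpen : (i : Int) < (xs.length : Int) - 1
      · have hne : ((xs.zip ys).drop (i + 1)) ≠ [] := fun hc => absurd hpen (hdropnil.mp hc)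
        simp [strokeRows, lastPt, hpen, hne]
      · have hnil : ((xs.zip ys).drop (i + 1)) = [] := hdropnil.mpr hpen
        simp [strokeRows, lastPt, hpen, hnil]
    · have hieq : i = xs.length := by omega
      have : (xs.zip ys).drop i = [] := by
        apply List.eq_nil_of_length_eq_zero
        simp [List.length_zip]; omega
      simp [h, this, strokeRows, lastPt]

-- combined last-point accumulator over the whole drawing
def lastAll (p : Int × Int) : List (List Int × List Int) → Int × Int
  | [] => p
  | s :: ss => lastAll (lastPt p (s.1.zip s.2)) ss

theorem foldA_eq (drawing : List (List Int × List Int))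
    (hpre : ∀ s ∈ drawing, s.1.length ≤ s.2.length) :
    ∀ (seq : List (List Int)) (p : Int × Int),
      drawing.foldl (fun st stroke => convertStrokesInner stroke.1 stroke.2 0 st) (seq, p) =
        (seq ++ allRows p drawing, lastAll p drawing) := by
  induction drawing with
  | nil => intro seq p; simp [allRows, lastAll]
  | cons s ss ih =>
    intro seq p
    have hs : s.1.length ≤ s.2.length := hpre s (List.mem_cons_self)
    simp only [List.foldl_cons]
    rw [convertStrokesInner_eq s.1 s.2 hs s.1.length 0 (by omega) (by omega) seq p]
    simp only [List.drop_zero]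
    rw [ih (fun t ht => hpre t (List.mem_cons_of_mem _ ht))]
    simp [allRows, lastAll, List.append_assoc]

-- B-side reference: rows from points and flags
def rowsOf (p : Int × Int) : List (Int × Int) → List Bool → List (List Int)
  | (x, y) :: ps, b :: bs =>
      ([x - p.1, y - p.2] ++ (if b then ([0, 1, 0] : List Int) else [1, 0, 0]))
        :: rowsOf (x, y) ps bs
  | _, _ => []

theorem zipMap_eq_rowsOf (pts : List (Int × Int)) :
    ∀ (flags : List Bool) (p : Int × Int),
      ((p :: pts).zip (pts.zip flags)).map
        (fun t => [t.2.1.1 - t.1.1, t.2.1.2 - t.1.2] ++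
          (if t.2.2 then ([0, 1, 0] : List Int) else [1, 0, 0])) = rowsOf p pts flags := by
  induction pts with
  | nil => intro flags p; simp [rowsOf]
  | cons q qs ih =>
    intro flags p
    cases flags with
    | nil => simp [rowsOf]
    | cons b bs =>
      simp only [List.zip_cons_cons, List.map_cons]
      rw [ih bs q]
      rcases q with ⟨x, y⟩
      simp [rowsOf]

def strokeFlags (pts : List (Int × Int)) : List Bool :=
  if pts.isEmpty then [] else List.replicate (pts.length - 1) false ++ [true]

theorem rowsOf_strokeFlags (pts : List (Int × Int)) :
    ∀ p, rowsOf p pts (strokeFlags pts) = strokeRows p pts := by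
  induction pts with
  | nil => intro p; simp [rowsOf, strokeRows]
  | cons q qs ih =>
    intro p
    rcases q with ⟨x, y⟩
    cases qs with
    | nil => simp [strokeFlags, rowsOf, strokeRows]
    | cons r rs =>
      rcases r with ⟨a, b⟩
      have : strokeFlags ((x, y) :: (a, b) :: rs) = false :: strokeFlags ((a, b) :: rs) := by
        simp [strokeFlags, List.replicate_succ]
      rw [this]
      simp only [rowsOf, strokeRows]
      rw [ih (x, y)]
      simp [strokeRows]

theorem length_strokeFlags (pts : List (Int × Int)) : (strokeFlags pts).length = pts.length := by
  cases pts with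
  | nil => simp [strokeFlags]
  | cons q qs => simp [strokeFlags]

theorem rowsOf_append (P1 : List (Int × Int)) :
    ∀ (F1 : List Bool) (P2 : List (Int × Int)) (F2 : List Bool) (p : Int × Int),
      F1.length = P1.length →
      rowsOf p (P1 ++ P2) (F1 ++ F2) = rowsOf p P1 F1 ++ rowsOf (lastPt p P1) P2 F2 := by
  induction P1 with
  | nil =>
    intro F1 P2 F2 p hlen
    have : F1 = [] := List.eq_nil_of_length_eq_zero (by simpa using hlen)
    simp [this, rowsOf, lastPt]
  | cons q qs ih =>
    intro F1 P2 F2 p hlen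
    cases F1 with
    | nil => simp at hlen
    | cons b bs =>
      rcases q with ⟨x, y⟩
      simp only [List.cons_append, rowsOf, lastPt]
      rw [ih bs P2 F2 (x, y) (by simpa using hlen)]

-- B's flatten fold
def pointsOf : List (List Int × List Int) → List (Int × Int)
  | [] => []
  | s :: ss => s.1.zip s.2 ++ pointsOf ss

def flagsOf : List (List Int × List Int) → List Bool
  | [] => []
  | s :: ss => strokeFlags (s.1.zip s.2) ++ flagsOf ss

theorem pts_eq_zip (xs ys : List Int) (h : xs.length ≤ ys.length) :
    (List.range xs.length).map
      (fun (i : Nat) => ((PySem.List.pyGet? xs (i : Int)).getD 0,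
                 (PySem.List.pyGet? ys (i : Int)).getD 0)) = xs.zip ys := by
  apply List.ext_getElem
  · simp [List.length_zip]; omega
  · intro i hi1 hi2
    simp only [List.getElem_map, List.getElem_range, List.getElem_zip]
    have hx : i < xs.length := by simpa using hi1
    have hy : i < ys.length := by omega
    simp [PySem.List.pyGet?_natCast, List.getElem?_eq_getElem, hx, hy]

theorem foldB_eq (drawing : List (List Int × List Int))
    (hpre : ∀ s ∈ drawing, s.1.length ≤ s.2.length) :
    ∀ (P : List (Int × Int)) (F : List Bool),
      drawing.foldl
        (fun (acc : List (Int × Int) × List Bool) stroke =>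
          let pts := (List.range stroke.1.length).map
            (fun (i : Nat) => ((PySem.List.pyGet? stroke.1 (i : Int)).getD 0,
                       (PySem.List.pyGet? stroke.2 (i : Int)).getD 0))
          (acc.1 ++ pts,
           acc.2 ++ (if pts.isEmpty then [] else List.replicate (pts.length - 1) false ++ [true])))
        (P, F) = (P ++ pointsOf drawing, F ++ flagsOf drawing) := by
  induction drawing with
  | nil => intro P F; simp [pointsOf, flagsOf]
  | cons s ss ih =>
    intro P F
    simp only [List.foldl_cons]
    rw [pts_eq_zip s.1 s.2 (hpre s (List.mem_cons_self))]
    rw [ih (fun t ht => hpre t (List.mem_cons_of_mem _ ht))]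
    simp [pointsOf, flagsOf, strokeFlags, List.append_assoc]

theorem rowsOf_flatten (drawing : List (List Int × List Int)) :
    ∀ p, rowsOf p (pointsOf drawing) (flagsOf drawing) = allRows p drawing := by
  induction drawing with
  | nil => intro p; simp [pointsOf, flagsOf, rowsOf, allRows]
  | cons s ss ih =>
    intro p
    simp only [pointsOf, flagsOf, allRows]
    rw [rowsOf_append _ _ _ _ _ (by rw [length_strokeFlags])]
    rw [rowsOf_strokeFlags, ih]

theorem convertStrokes_alt_eq (drawing : List (List Int × List Int))
    (hpre : ∀ s ∈ drawing, s.1.length ≤ s.2.length) :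
    convertStrokes_alt drawing = allRows (0, 0) drawing ++ [[0, 0, 0, 0, 1]] := by
  unfold convertStrokes_alt
  rw [foldB_eq drawing hpre]
  simp only [List.nil_append]
  rw [zipMap_eq_rowsOf, rowsOf_flatten]

-- ===== VERDICT (by name: the statement is the Claim_ definition above) =====
theorem convertStrokes_spec : Claim_equal_convertStrokes := by
  intro drawing _ hpre
  unfold Spec_convertStrokes convertStrokes
  rw [foldA_eq drawing hpre, convertStrokes_alt_eq drawing hpre]
  simp
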